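-- pv_equiv track=rewrite | github.com/weijiasun2013/Algorithms | dynamic/word_break_longest.py | word_break_longest
-- ===== SOURCE A (Python) =====
-- def word_break_longest(sen,dct):
--     dp = [ [False for x in range(len(sen))] for y in range(len(sen))]
--     _max, _sIdx = 0, -1
--
--     for length in range(1,len(sen)+1):
--         for sIdx in range(0,len(sen)-length+1):
--             eIdx = sIdx + length - 1
--             tmp = sen[sIdx:eIdx+1]
--             if tmp in dct:
--                 dp[sIdx][eIdx] = True
--                 if _max < len(tmp):
--                     _max = len(tmp)
--                     _sIdx = sIdx
--             else:
--                 for tail in range(sIdx,eIdx):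
--                     if dp[sIdx][tail] and dp[tail+1][eIdx]:
--                         dp[sIdx][eIdx] = True
--                         if _max < len(tmp):
--                             _max = len(tmp)
--                             _sIdx = sIdx
--                         break
--     return _max, _sIdx
-- ===== SOURCE B (Python) =====
-- def word_break_longest(sen, dct):
--     # Forward-reachability DP over start positions (right to left), O(n * total word length)
--     n = len(sen)
--     words = [w for w in dct if w]
--     # best[i] = length of the longest substring starting at i that splits into dictionary words (0 if none)
--     best = [0] * (n + 1)
--     for i in range(n - 1, -1, -1):
--         b = 0
--         for w in words:
--             if sen.startswith(w, i):
--                 b = max(b, len(w) + best[i + len(w)])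
--         best[i] = b
--     m, s = 0, -1
--     for i in range(n):
--         if best[i] > m:
--             m, s = best[i], i
--     return m, s
-- ===== Notes on version B (the rewrite author's own statement) =====
-- stated objective: faster
-- what changed: Replaces the O(n^3)-plus-membership interval DP (dp[s][e] with an inner split loop and 'tmp in dct' scans) by a right-to-left forward-reachability DP best[i] = length of the longest dictionary-segmentable substring starting at i, computed in one pass over positions with one word-matching scan each, followed by a single argmax pass.
import Mathlib
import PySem

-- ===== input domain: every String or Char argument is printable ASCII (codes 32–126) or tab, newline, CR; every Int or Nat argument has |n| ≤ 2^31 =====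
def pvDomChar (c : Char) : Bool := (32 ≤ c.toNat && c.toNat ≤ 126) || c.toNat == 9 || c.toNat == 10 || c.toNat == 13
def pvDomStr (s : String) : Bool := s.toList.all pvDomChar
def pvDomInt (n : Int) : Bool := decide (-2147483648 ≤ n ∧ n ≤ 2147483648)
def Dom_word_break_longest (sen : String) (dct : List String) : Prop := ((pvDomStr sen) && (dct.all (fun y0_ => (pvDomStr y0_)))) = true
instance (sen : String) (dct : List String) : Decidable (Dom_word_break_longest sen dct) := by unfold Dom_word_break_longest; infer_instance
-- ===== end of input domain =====

-- B replaces A's O(n^3)+membership interval DP by a right-to-left reachability DP over start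
-- positions (best[i] = longest dictionary-segmentable substring starting at i); same result.

-- ===== PORT A =====
-- dp[sIdx][eIdx] is a list-of-lists of Bool; the inner 'for tail … break' executes its body at most
-- once, at the first tail satisfying the test: ported with find?.
def word_break_longest (sen : String) (dct : List String) : Int × Int :=
  let cs := sen.toList
  let d := dct.map String.toList
  let n : Int := (cs.length : Int)
  let dp0 : List (List Bool) := List.replicate cs.length (List.replicate cs.length false)
  let st := (PySem.List.pyRange 1 (n+1) 1).foldl (fun st length =>
    (PySem.List.pyRange 0 (n - length + 1) 1).foldl (fun st sIdx =>
      let dp := st.1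
      let eIdx := sIdx + length - 1
      let tmp := PySem.List.slice cs (some sIdx) (some (eIdx+1))
      if tmp ∈ d then
        let dp' := PySem.List.pySetD dp sIdx (PySem.List.pySetD (PySem.List.pyGetD dp sIdx []) eIdx true)
        if st.2.1 < (tmp.length : Int) then (dp', (tmp.length : Int), sIdx) else (dp', st.2.1, st.2.2)
      else
        match (PySem.List.pyRange sIdx eIdx 1).find? (fun tail =>
            PySem.List.pyGetD (PySem.List.pyGetD dp sIdx []) tail false &&
            PySem.List.pyGetD (PySem.List.pyGetD dp (tail+1) []) eIdx false) with
        | some _ =>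
          let dp' := PySem.List.pySetD dp sIdx (PySem.List.pySetD (PySem.List.pyGetD dp sIdx []) eIdx true)
          if st.2.1 < (tmp.length : Int) then (dp', (tmp.length : Int), sIdx) else (dp', st.2.1, st.2.2)
        | none => st
    ) st
  ) (dp0, (0 : Int), (-1 : Int))
  (st.2.1, st.2.2)

-- ===== PORT B =====
-- sen.startswith(w, i) ported as w.isPrefixOf (cs.drop i.toNat): exact since the loop index i
-- satisfies 0 ≤ i < len(sen).
def word_break_longest_alt (sen : String) (dct : List String) : Int × Int :=
  let cs := sen.toList
  let n : Int := (cs.length : Int)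
  let words := (dct.map String.toList).filter (fun w => !w.isEmpty)
  let best0 : List Int := List.replicate (cs.length + 1) 0
  let best := (PySem.List.pyRange (n-1) (-1) (-1)).foldl (fun best i =>
    let b := words.foldl (fun b w =>
      if w.isPrefixOf (cs.drop i.toNat) then
        max b ((w.length : Int) + PySem.List.pyGetD best (i + (w.length : Int)) 0)
      else b) 0
    PySem.List.pySetD best i b) best0
  (PySem.List.pyRange 0 n 1).foldl (fun p i =>
    if p.1 < PySem.List.pyGetD best i 0 then (PySem.List.pyGetD best i 0, i) else p)
    ((0 : Int), (-1 : Int))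

-- ===== PRECONDITION & SPEC =====
def Spec_word_break_longest (sen : String) (dct : List String) (out : Int × Int) : Prop := out = word_break_longest_alt sen dct
instance (sen : String) (dct : List String) (out : Int × Int) : Decidable (Spec_word_break_longest sen dct out) := by unfold Spec_word_break_longest; infer_instance

-- ===== CLAIM (what is proved, stated in full; the proofs are below) =====
def Claim_equal_word_break_longest : Prop := ∀ (sen : String) (dct : List String), Dom_word_break_longest sen dct → Spec_word_break_longest sen dct (word_break_longest sen dct)

-- ===== LEMMAS AND PROOFS =====

def pvChunk (cs : List Char) (s L : Nat) : List Char := (cs.drop s).take L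

def pvSeg (cs : List Char) (d : List (List Char)) (s L : Nat) : Bool :=
  decide (pvChunk cs s L ∈ d) ||
  ((List.range (L-1)).attach.any (fun t =>
     pvSeg cs d s (t.1+1) && pvSeg cs d (s+t.1+1) (L-1-t.1)))
termination_by L
decreasing_by
  · have := List.mem_range.mp t.2; omega
  · have := List.mem_range.mp t.2; omega

theorem pvSeg_eq (cs : List Char) (d : List (List Char)) (s L : Nat) :
    pvSeg cs d s L =
    (decide (pvChunk cs s L ∈ d) ||
      ((List.range (L-1)).any (fun t =>
        pvSeg cs d s (t+1) && pvSeg cs d (s+t+1) (L-1-t)))) := by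
  rw [pvSeg]
  congr 1
  simp

theorem pvSeg_of_mem (cs : List Char) (d : List (List Char)) (s L : Nat)
    (h : pvChunk cs s L ∈ d) : pvSeg cs d s L = true := by
  rw [pvSeg_eq]; simp [h]

theorem pvSeg_glue (cs : List Char) (d : List (List Char)) (a p q : Nat)
    (hp : 0 < p) (hq : 0 < q)
    (h1 : pvSeg cs d a p = true) (h2 : pvSeg cs d (a+p) q = true) :
    pvSeg cs d a (p+q) = true := by
  rw [pvSeg_eq]
  apply Bool.or_eq_true_iff.mpr
  right
  rw [List.any_eq_true]
  refine ⟨p-1, by simp [List.mem_range]; omega, ?_⟩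
  have e1 : p - 1 + 1 = p := by omega
  have e2 : a + (p-1) + 1 = a + p := by omega
  have e3 : p + q - 1 - (p-1) = q := by omega
  rw [e1, e2, e3, h1, h2]; rfl

theorem pvSeg_chain (cs : List Char) (d : List (List Char)) :
    ∀ L i, 0 < L → pvSeg cs d i L = true →
    ∃ k, 0 < k ∧ k ≤ L ∧ pvChunk cs i k ∈ d ∧ (k = L ∨ pvSeg cs d (i+k) (L-k) = true) := by
  intro L
  induction L using Nat.strong_induction_on with
  | _ L IH =>
    intro i hL h
    rw [pvSeg_eq] at h
    rcases Bool.or_eq_true_iff.mp h with h | h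
    · exact ⟨L, hL, le_refl _, by simpa using h, Or.inl rfl⟩
    · rw [List.any_eq_true] at h
      obtain ⟨t, ht, hb⟩ := h
      rw [List.mem_range] at ht
      rw [Bool.and_eq_true] at hb
      obtain ⟨k, hk0, hkle, hkd, hrest⟩ := IH (t+1) (by omega) i (by omega) hb.1
      refine ⟨k, hk0, by omega, hkd, Or.inr ?_⟩
      by_cases hk : k = t + 1
      · have e2 : L - k = L - 1 - t := by omega
        have e3 : i + k = i + t + 1 := by omega
        rw [e2, e3]; exact hb.2
      · rcases hrest with hke | hseg
        · exact absurd hke hk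
        · have e : t + 1 - k + (L - 1 - t) = L - k := by omega
          have := pvSeg_glue cs d (i+k) (t+1-k) (L-1-t) (by omega) (by omega) hseg
            (by have e2 : i + k + (t+1-k) = i + t + 1 := by omega
                rw [e2]; exact hb.2)
          rw [e] at this
          exact this

def pvMaxSeg (cs : List Char) (d : List (List Char)) (i : Nat) : Nat :=
  Nat.findGreatest (fun L => 0 < L ∧ pvSeg cs d i L = true) (cs.length - i)

theorem pvMaxSeg_le (cs : List Char) (d : List (List Char)) (i : Nat) :
    pvMaxSeg cs d i ≤ cs.length - i := Nat.findGreatest_le _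

theorem pvSeg_pvMaxSeg (cs : List Char) (d : List (List Char)) (i : Nat)
    (h : 0 < pvMaxSeg cs d i) : pvSeg cs d i (pvMaxSeg cs d i) = true :=
  ((Nat.findGreatest_eq_iff.1 rfl).2.1 (Nat.pos_iff_ne_zero.mp h)).2

theorem le_pvMaxSeg (cs : List Char) (d : List (List Char)) (i L : Nat)
    (h0 : 0 < L) (hn : L ≤ cs.length - i) (hs : pvSeg cs d i L = true) :
    L ≤ pvMaxSeg cs d i :=
  Nat.le_findGreatest hn ⟨h0, hs⟩

-- a nonempty dictionary word matching at i, as chunk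
theorem prefix_iff_chunk (cs w : List Char) (i : Nat) :
    w.isPrefixOf (cs.drop i) = true ↔ (pvChunk cs i w.length = w ∧ w.length ≤ cs.length - i) := by
  rw [List.isPrefixOf_iff_prefix]
  constructor
  · intro h
    refine ⟨?_, by simpa [List.length_drop] using h.length_le⟩
    unfold pvChunk
    exact (List.prefix_iff_eq_take.mp h).symm
  · rintro ⟨hc, _⟩
    rw [← hc]
    exact List.take_prefix _ _

theorem length_pvChunk (cs : List Char) (i k : Nat) (h : k ≤ cs.length - i) :
    (pvChunk cs i k).length = k := by
  unfold pvChunk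
  simp [List.length_take, List.length_drop]
  omega

-- MAXREC: the value B computes at position i equals pvMaxSeg i, given the tail reads are pvMaxSeg
theorem pvMaxSeg_rec (cs : List Char) (d : List (List Char)) (i : Nat) (hi : i ≤ cs.length) :
    (pvMaxSeg cs d i : Int) =
    ((d.filter (fun w => !w.isEmpty)).filter (fun w => w.isPrefixOf (cs.drop i))).foldl
      (fun b w => max b ((w.length : Int) + (pvMaxSeg cs d (i + w.length) : Int))) 0 := by
  set words := d.filter (fun w => !w.isEmpty) with hwords
  set matching := words.filter (fun w => w.isPrefixOf (cs.drop i)) with hmatch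
  set f : List Char → Int := fun w => (w.length : Int) + (pvMaxSeg cs d (i + w.length) : Int) with hf
  have hfold : matching.foldl (fun b w => max b (f w)) 0 = (matching.map f).foldl max 0 := by
    rw [List.foldl_map]
  rw [hfold]
  -- facts about the running max
  have hub := PySem.List.le_foldl_max (matching.map f) 0
  have hmem := PySem.List.foldl_max_mem (matching.map f) 0
  -- each candidate ≤ pvMaxSeg i
  have hcand : ∀ w ∈ matching, f w ≤ (pvMaxSeg cs d i : Int) := by
    intro w hw
    rw [hmatch, List.mem_filter] at hw
    obtain ⟨hw1, hw2⟩ := hw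
    rw [hwords, List.mem_filter] at hw1
    obtain ⟨hwd, hwne⟩ := hw1
    have hpre := (prefix_iff_chunk cs w i).mp hw2
    have hwlen : 0 < w.length := by
      cases w with
      | nil => simp at hwne
      | cons a t => simp
    have hsegw : pvSeg cs d i w.length = true := by
      apply pvSeg_of_mem
      rw [hpre.1]; exact hwd
    set q := pvMaxSeg cs d (i + w.length) with hq
    have hqle : q ≤ cs.length - (i + w.length) := pvMaxSeg_le cs d _
    by_cases hq0 : q = 0
    · rw [hf]
      have hq0' : ((pvMaxSeg cs d (i + w.length) : Nat) : Int) = 0 := by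
        rw [show pvMaxSeg cs d (i + w.length) = q from rfl, hq0]; rfl
      show (w.length : Int) + ((pvMaxSeg cs d (i + w.length) : Nat) : Int) ≤ _
      rw [hq0']
      have : w.length ≤ pvMaxSeg cs d i := le_pvMaxSeg cs d i _ hwlen hpre.2 hsegw
      omega
    · have hqseg : pvSeg cs d (i + w.length) q = true := pvSeg_pvMaxSeg cs d _ (by omega)
      have hglue := pvSeg_glue cs d i w.length q hwlen (by omega) hsegw hqseg
      have hle : w.length + q ≤ pvMaxSeg cs d i := by
        apply le_pvMaxSeg cs d i _ (by omega) (by omega) hglue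
      rw [hf]; push_cast; omega
  -- candidates reach pvMaxSeg i
  have hreach : (pvMaxSeg cs d i : Int) ≤ (matching.map f).foldl max 0 := by
    by_cases hM0 : pvMaxSeg cs d i = 0
    · rw [hM0]; exact_mod_cast hub.1
    · set L := pvMaxSeg cs d i with hL
      have hLn : L ≤ cs.length - i := pvMaxSeg_le cs d i
      have hseg : pvSeg cs d i L = true := pvSeg_pvMaxSeg cs d i (by omega)
      obtain ⟨k, hk0, hkL, hkd, hrest⟩ := pvSeg_chain cs d L i (by omega) hseg
      set w := pvChunk cs i k with hw
      have hwlen : w.length = k := length_pvChunk cs i k (by omega)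
      have hwm : w ∈ matching := by
        rw [hmatch, List.mem_filter, hwords, List.mem_filter]
        refine ⟨⟨hkd, ?_⟩, ?_⟩
        · cases hwe : w with
          | nil => rw [hwe] at hwlen; simp at hwlen; omega
          | cons a t => simp
        · rw [prefix_iff_chunk]
          exact ⟨by rw [hwlen], by omega⟩
      have hfw : (L : Int) ≤ f w := by
        rw [hf]
        simp only [hwlen]
        have : L - k ≤ pvMaxSeg cs d (i + k) := by
          by_cases hkeL : k = L
          · omega
          · rcases hrest with hke | hsegr
            · exact absurd hke hkeL
            · exact le_pvMaxSeg cs d (i+k) (L-k) (by omega) (by omega) hsegr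
        omega
      calc (L : Int) ≤ f w := hfw
        _ ≤ _ := hub.2 (f w) (List.mem_map_of_mem hwm)
  have h0 : (0:Int) ≤ (matching.map f).foldl max 0 := hub.1
  apply le_antisymm
  · exact hreach
  · rcases hmem with h | h
    · rw [h]; exact_mod_cast Nat.zero_le _
    · obtain ⟨w, hwm, hfw⟩ := List.mem_map.mp h
      rw [← hfw]
      exact hcand w hwm

-- running max of f over range n
def pvFm (f : Nat → Nat) (n : Nat) : Nat := (List.range n).foldl (fun a j => max a (f j)) 0

theorem pvFm_succ (f : Nat → Nat) (n : Nat) : pvFm f (n+1) = max (pvFm f n) (f n) := by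
  unfold pvFm
  rw [List.range_succ, List.foldl_append]
  rfl

theorem le_pvFm (f : Nat → Nat) (n j : Nat) (h : j < n) : f j ≤ pvFm f n := by
  unfold pvFm
  have := (PySem.List.le_foldl_max_nat (List.range n) f 0).2 j (List.mem_range.mpr h)
  exact this

theorem pvFm_attain (f : Nat → Nat) (n : Nat) : pvFm f n = 0 ∨ ∃ j, j < n ∧ f j = pvFm f n := by
  have he : pvFm f n = ((List.range n).map f).foldl max 0 := by
    unfold pvFm; rw [List.foldl_map]
  rcases PySem.List.foldl_max_mem ((List.range n).map f) 0 with h | h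
  · left; rw [he, h]
  · right
    rw [← he] at h
    obtain ⟨j, hj, hfj⟩ := List.mem_map.mp h
    exact ⟨j, List.mem_range.mp hj, hfj⟩

-- the first-strict-record fold over range n computes (max, first argmax)
theorem pvArgfold (f : Nat → Nat) (n : Nat) :
    (List.range n).foldl
      (fun p j => if p.1 < (f j : Int) then ((f j : Int), (j : Int)) else p)
      ((0 : Int), (-1 : Int))
    = ((pvFm f n : Int),
       if pvFm f n = 0 then (-1 : Int)
       else (((List.range n).find? (fun j => f j == pvFm f n)).getD 0 : Int)) := by
  induction n with
  | zero => simp [pvFm]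
  | succ n IH =>
    rw [List.range_succ, List.foldl_append, IH]
    simp only [List.foldl_cons, List.foldl_nil]
    rw [pvFm_succ]
    by_cases hlt : pvFm f n < f n
    · rw [if_pos (by exact_mod_cast hlt)]
      have hmax : max (pvFm f n) (f n) = f n := by omega
      rw [hmax]
      have hnone : (List.range n).find? (fun j => f j == f n) = none := by
        rw [List.find?_eq_none]
        intro j hj
        have := le_pvFm f n j (List.mem_range.mp hj)
        simp only [beq_iff_eq]
        omega
      rw [List.find?_append, hnone]
      have hne : f n ≠ 0 := by omega
      simp [hne]
    · rw [if_neg (by exact_mod_cast hlt)]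
      have hmax : max (pvFm f n) (f n) = pvFm f n := by omega
      rw [hmax]
      by_cases h0 : pvFm f n = 0
      · simp [h0]
      · rw [if_neg h0, if_neg h0]
        rcases pvFm_attain f n with h | ⟨j, hj, hfj⟩
        · exact absurd h h0
        · have hany : (List.range n).any (fun j => f j == pvFm f n) = true := by
            rw [List.any_eq_true]
            refine ⟨j, List.mem_range.mpr hj, ?_⟩
            simp only [hfj, beq_self_eq_true]
          have hsome : ((List.range n).find? (fun j => f j == pvFm f n)).isSome := by
            simp only [List.find?_isSome]; exact List.any_eq_true.mp hany
          obtain ⟨v, hv⟩ := Option.isSome_iff_exists.mp hsome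
          rw [List.find?_append, hv]
          rfl

def pvBmix (cs : List Char) (d : List (List Char)) (m : Nat) : List Int :=
  (List.range (cs.length+1)).map (fun j => if cs.length - m ≤ j then ((pvMaxSeg cs d j : Nat) : Int) else 0)

theorem pvMaxSeg_of_ge (cs : List Char) (d : List (List Char)) (j : Nat) (h : cs.length ≤ j) :
    pvMaxSeg cs d j = 0 := by
  unfold pvMaxSeg
  rw [Nat.sub_eq_zero_of_le h]
  exact Nat.findGreatest_zero

theorem pvBmix_get (cs : List Char) (d : List (List Char)) (m j : Nat) (hj : j < cs.length+1) :
    PySem.List.pyGetD (pvBmix cs d m) (j : Int) 0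
      = if cs.length - m ≤ j then ((pvMaxSeg cs d j : Nat) : Int) else 0 := by
  rw [PySem.List.pyGetD_natCast]
  unfold pvBmix
  rw [List.getD_eq_getElem?_getD]
  simp [hj]

theorem pvBmix_zero (cs : List Char) (d : List (List Char)) :
    List.replicate (cs.length+1) (0 : Int) = pvBmix cs d 0 := by
  apply List.ext_getElem
  · simp [pvBmix]
  · intro j h1 h2
    simp only [pvBmix, List.getElem_replicate, List.getElem_map, List.getElem_range]
    simp only [List.length_replicate] at h1
    by_cases hc : cs.length - 0 ≤ j
    · rw [if_pos hc, pvMaxSeg_of_ge cs d j (by omega)]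
      rfl
    · rw [if_neg hc]

-- one iteration of B's best-building loop
theorem pvB_step (cs : List Char) (d : List (List Char)) (m : Nat) (hm : m < cs.length) :
    (let best := pvBmix cs d m
     let i : Int := (cs.length : Int) - 1 - (m : Int)
     let b := ((d.filter (fun w => !w.isEmpty))).foldl (fun b w =>
        if w.isPrefixOf (cs.drop i.toNat) then
          max b ((w.length : Int) + PySem.List.pyGetD best (i + (w.length : Int)) 0)
        else b) 0
     PySem.List.pySetD best i b) = pvBmix cs d (m+1) := by
  set n := cs.length with hn
  have hi : ((n : Int) - 1 - (m : Int)) = ((n - 1 - m : Nat) : Int) := by omega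
  set i₀ : Nat := n - 1 - m with hi0
  simp only [hi]
  have htoNat : ((i₀ : Nat) : Int).toNat = i₀ := by omega
  rw [htoNat]
  -- rewrite the reads
  have hcong : (d.filter (fun w => !w.isEmpty)).foldl (fun b w =>
        if w.isPrefixOf (cs.drop i₀) then
          max b ((w.length : Int) + PySem.List.pyGetD (pvBmix cs d m) ((i₀ : Int) + (w.length : Int)) 0)
        else b) 0
      = (d.filter (fun w => !w.isEmpty)).foldl (fun b w =>
        if w.isPrefixOf (cs.drop i₀) then
          max b ((w.length : Int) + ((pvMaxSeg cs d (i₀ + w.length) : Nat) : Int))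
        else b) 0 := by
    apply PySem.List.foldl_congr_mem
    intro b w hw
    by_cases hp : w.isPrefixOf (cs.drop i₀)
    · rw [if_pos hp, if_pos hp]
      have hlen := (prefix_iff_chunk cs w i₀).mp hp
      have hwne : 0 < w.length := by
        rcases List.mem_filter.mp hw with ⟨_, h2⟩
        cases w with
        | nil => simp at h2
        | cons a t => simp
      have hcast : ((i₀ : Int) + (w.length : Int)) = ((i₀ + w.length : Nat) : Int) := by push_cast; ring
      rw [hcast, pvBmix_get cs d m (i₀ + w.length) (by omega)]
      rw [if_pos (by omega)]
    · rw [if_neg hp, if_neg hp]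
  rw [hcong]
  have hfold : (d.filter (fun w => !w.isEmpty)).foldl (fun b w =>
        if w.isPrefixOf (cs.drop i₀) then
          max b ((w.length : Int) + ((pvMaxSeg cs d (i₀ + w.length) : Nat) : Int))
        else b) 0
      = ((pvMaxSeg cs d i₀ : Nat) : Int) := by
    rw [PySem.List.foldl_if_eq_foldl_filter]
    exact (pvMaxSeg_rec cs d i₀ (by omega)).symm
  rw [hfold]
  -- the write
  rw [PySem.List.pySetD_natCast]
  apply List.ext_getElem
  · simp [pvBmix]
  · intro j h1 h2
    simp only [List.length_set] at h1
    simp only [pvBmix, List.length_map, List.length_range] at h1 h2 ⊢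
    rw [List.getElem_set]
    simp only [List.getElem_map, List.getElem_range]
    by_cases hji : j = i₀
    · rw [if_pos (by omega), if_pos (by omega)]
      subst hji; rfl
    · rw [if_neg (by omega)]
      by_cases hc : n - m ≤ j
      · rw [if_pos hc, if_pos (by omega)]
      · rw [if_neg hc, if_neg (by omega)]

def pvOut (cs : List Char) (d : List (List Char)) : Int × Int :=
  ((pvFm (pvMaxSeg cs d) cs.length : Int),
   if pvFm (pvMaxSeg cs d) cs.length = 0 then (-1 : Int)
   else (((List.range cs.length).find? (fun j => pvMaxSeg cs d j == pvFm (pvMaxSeg cs d) cs.length)).getD 0 : Int))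

theorem pvB_fold (cs : List Char) (d : List (List Char)) :
    ∀ m, m ≤ cs.length → (List.range m).foldl
      (fun best (k : Nat) =>
        PySem.List.pySetD best ((cs.length : Int) - 1 - (k : Int))
          ((d.filter (fun w => !w.isEmpty)).foldl (fun b w =>
            if w.isPrefixOf (cs.drop ((cs.length : Int) - 1 - (k : Int)).toNat) then
              max b ((w.length : Int) + PySem.List.pyGetD best (((cs.length : Int) - 1 - (k : Int)) + (w.length : Int)) 0)
            else b) 0)) (pvBmix cs d 0) = pvBmix cs d m := by
  intro m
  induction m with
  | zero => intro _; simp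
  | succ m IH =>
    intro hm
    rw [List.range_succ, List.foldl_append, IH (by omega)]
    simp only [List.foldl_cons, List.foldl_nil]
    exact pvB_step cs d m (by omega)

theorem alt_eq_pvOut (sen : String) (dct : List String) :
    word_break_longest_alt sen dct = pvOut sen.toList (dct.map String.toList) := by
  unfold word_break_longest_alt
  set cs := sen.toList with hcs
  set d := dct.map String.toList with hd
  set n := cs.length with hn
  simp only []
  have hrange : PySem.List.pyRange ((n : Int) - 1) (-1) (-1)
      = (List.range n).map (fun (k : Nat) => ((n : Int) - 1) - (k : Int)) := by
    rw [PySem.List.pyRange_neg_one]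
    have : (((n : Int) - 1) - (-1)).toNat = n := by omega
    rw [this]
  rw [hrange, List.foldl_map, pvBmix_zero cs d]
  have hfold := pvB_fold cs d n (le_refl n)
  rw [hfold]
  have hrange2 : PySem.List.pyRange 0 (n : Int) 1
      = (List.range n).map (fun (k : Nat) => (k : Int)) := by
    rw [PySem.List.pyRange_one]
    have : (((n : Int) - 0)).toNat = n := by omega
    rw [this]
    apply List.map_congr_left
    intro k _
    omega
  rw [hrange2, List.foldl_map]
  have hcong2 : (List.range n).foldl
      (fun (p : Int × Int) j => if p.1 < PySem.List.pyGetD (pvBmix cs d n) ((j : Nat) : Int) 0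
        then (PySem.List.pyGetD (pvBmix cs d n) ((j : Nat) : Int) 0, ((j : Nat) : Int)) else p)
      ((0 : Int), (-1 : Int))
      = (List.range n).foldl
      (fun (p : Int × Int) j => if p.1 < ((pvMaxSeg cs d j : Nat) : Int)
        then (((pvMaxSeg cs d j : Nat) : Int), (j : Int)) else p)
      ((0 : Int), (-1 : Int)) := by
    apply PySem.List.foldl_congr_mem
    intro p j hj
    rw [pvBmix_get cs d n j (by have := List.mem_range.mp hj; omega)]
    rw [if_pos (show cs.length - n ≤ j by omega)]
  rw [hcong2, pvArgfold (fun j => pvMaxSeg cs d j) n]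
  rfl

def pvCell (cs : List Char) (d : List (List Char)) (Λ s e : Nat) : Bool :=
  decide (s ≤ e) && decide (e + 1 - s ≤ Λ) && pvSeg cs d s (e+1-s)

def pvCellP (cs : List Char) (d : List (List Char)) (L k s e : Nat) : Bool :=
  pvCell cs d (L-1) s e ||
    (decide (s ≤ e) && decide (e + 1 - s = L) && decide (s < k) && pvSeg cs d s L)

def pvMat (cs : List Char) (d : List (List Char)) (Λ : Nat) : List (List Bool) :=
  (List.range cs.length).map (fun s => (List.range cs.length).map (fun e => pvCell cs d Λ s e))

def pvMatP (cs : List Char) (d : List (List Char)) (L k : Nat) : List (List Bool) :=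
  (List.range cs.length).map (fun s => (List.range cs.length).map (fun e => pvCellP cs d L k s e))

theorem pvMatP_read (cs : List Char) (d : List (List Char)) (L k s e : Nat)
    (hs : s < cs.length) (he : e < cs.length) :
    PySem.List.pyGetD (PySem.List.pyGetD (pvMatP cs d L k) (s : Int) []) (e : Int) false
      = pvCellP cs d L k s e := by
  rw [PySem.List.pyGetD_natCast, PySem.List.pyGetD_natCast]
  unfold pvMatP
  rw [List.getD_eq_getElem?_getD]
  simp [hs, List.getD_eq_getElem?_getD, he]

theorem pvMatP_zero (cs : List Char) (d : List (List Char)) (L : Nat) :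
    pvMat cs d (L-1) = pvMatP cs d L 0 := by
  unfold pvMat pvMatP
  apply List.map_congr_left
  intro s _
  apply List.map_congr_left
  intro e _
  unfold pvCellP
  simp

theorem pvMatP_full (cs : List Char) (d : List (List Char)) (L : Nat)
    (hL1 : 1 ≤ L) (hLn : L ≤ cs.length) :
    pvMatP cs d L (cs.length - L + 1) = pvMat cs d L := by
  unfold pvMat pvMatP
  apply List.map_congr_left
  intro s hs
  apply List.map_congr_left
  intro e he
  rw [List.mem_range] at hs he
  unfold pvCellP pvCell
  by_cases hse : s ≤ e
  · by_cases heq : e + 1 - s = L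
    · have hsk : s < cs.length - L + 1 := by omega
      have hseg : pvSeg cs d s (e+1-s) = pvSeg cs d s L := by rw [heq]
      simp [hse, heq, hsk]
    · simp [hse, heq]
      congr 1
      simp only [decide_eq_decide]
      omega
  · simp [hse]

theorem pvMat_init (cs : List Char) (d : List (List Char)) :
    List.replicate cs.length (List.replicate cs.length false) = pvMat cs d 0 := by
  unfold pvMat
  apply List.ext_getElem
  · simp
  · intro j h1 h2
    simp only [List.getElem_replicate, List.getElem_map, List.getElem_range]
    apply List.ext_getElem
    · simp
    · intro e he1 he2
      simp only [List.getElem_replicate, List.getElem_map, List.getElem_range]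
      unfold pvCell
      simp only [List.length_replicate] at he1
      have : ¬ (e + 1 - j ≤ 0 ∧ j ≤ e) := by omega
      by_cases hse : j ≤ e
      · have : ¬ (e + 1 - j ≤ 0) := by omega
        simp [this]
      · simp [hse]

-- writing cell (k, k+L-1) true
theorem pvMatP_write (cs : List Char) (d : List (List Char)) (L k : Nat)
    (hL1 : 1 ≤ L) (hk : k + L ≤ cs.length) (hseg : pvSeg cs d k L = true) :
    PySem.List.pySetD (pvMatP cs d L k) (k : Int)
      (PySem.List.pySetD (PySem.List.pyGetD (pvMatP cs d L k) (k : Int) []) ((k + L - 1 : Nat) : Int) true)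
      = pvMatP cs d L (k+1) := by
  rw [PySem.List.pySetD_natCast, PySem.List.pySetD_natCast, PySem.List.pyGetD_natCast]
  have hkn : k < cs.length := by omega
  have hrow : (pvMatP cs d L k).getD k []
      = (List.range cs.length).map (fun e => pvCellP cs d L k k e) := by
    unfold pvMatP
    rw [List.getD_eq_getElem?_getD]
    simp [hkn]
  rw [hrow]
  apply List.ext_getElem
  · simp [pvMatP]
  · intro s h1 h2
    simp only [List.length_set, pvMatP, List.length_map, List.length_range] at h1 h2
    rw [List.getElem_set]
    simp only [pvMatP, List.getElem_map, List.getElem_range]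
    by_cases hsk : s = k
    · rw [if_pos hsk.symm]
      apply List.ext_getElem
      · simp
      · intro e he1 he2
        simp only [List.length_set, List.length_map, List.length_range] at he1 he2
        rw [List.getElem_set]
        simp only [List.getElem_map, List.getElem_range]
        subst hsk
        by_cases hek : e = s + L - 1
        · rw [if_pos hek.symm]
          unfold pvCellP
          have : s ≤ e ∧ e + 1 - s = L := by omega
          simp [this.1, this.2, hseg, show s < s + 1 by omega]
        · rw [if_neg (fun h => hek h.symm)]
          unfold pvCellP
          have hne : ¬ (e + 1 - s = L ∧ s ≤ e) := by omega
          by_cases hse : s ≤ e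
          · have : ¬ (e + 1 - s = L) := by omega
            simp [this]
          · simp [hse]
    · rw [if_neg (fun h => hsk h.symm)]
      apply List.map_congr_left
      intro e _
      unfold pvCellP
      have : (s < k + 1) ↔ (s < k) := by omega
      simp [this]

-- a non-write keeps the partial matrix in step
theorem pvMatP_skip (cs : List Char) (d : List (List Char)) (L k : Nat)
    (hseg : pvSeg cs d k L = false) :
    pvMatP cs d L k = pvMatP cs d L (k+1) := by
  unfold pvMatP
  apply List.map_congr_left
  intro s _
  apply List.map_congr_left
  intro e _
  unfold pvCellP
  by_cases hsk : s = k
  · subst hsk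
    by_cases hL : e + 1 - s = L
    · have : pvSeg cs d s L = false := hseg
      simp [this]
    · simp [hL]
  · have : (s < k + 1) ↔ (s < k) := by omega
    simp [this]

-- A's inner loop body, named for the proofs (identical to the lambda in the port)
def pvABody (cs : List Char) (d : List (List Char)) (length : Int) :
    List (List Bool) × Int × Int → Int → List (List Bool) × Int × Int := fun st sIdx =>
  let dp := st.1
  let eIdx := sIdx + length - 1
  let tmp := PySem.List.slice cs (some sIdx) (some (eIdx+1))
  if tmp ∈ d then
    let dp' := PySem.List.pySetD dp sIdx (PySem.List.pySetD (PySem.List.pyGetD dp sIdx []) eIdx true)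
    if st.2.1 < (tmp.length : Int) then (dp', (tmp.length : Int), sIdx) else (dp', st.2.1, st.2.2)
  else
    match (PySem.List.pyRange sIdx eIdx 1).find? (fun tail =>
        PySem.List.pyGetD (PySem.List.pyGetD dp sIdx []) tail false &&
        PySem.List.pyGetD (PySem.List.pyGetD dp (tail+1) []) eIdx false) with
    | some _ =>
      let dp' := PySem.List.pySetD dp sIdx (PySem.List.pySetD (PySem.List.pyGetD dp sIdx []) eIdx true)
      if st.2.1 < (tmp.length : Int) then (dp', (tmp.length : Int), sIdx) else (dp', st.2.1, st.2.2)
    | none => st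

theorem word_break_longest_eq_body (sen : String) (dct : List String) :
    word_break_longest sen dct =
      (((PySem.List.pyRange 1 ((sen.toList.length : Int)+1) 1).foldl (fun st length =>
        (PySem.List.pyRange 0 ((sen.toList.length : Int) - length + 1) 1).foldl
          (pvABody sen.toList (dct.map String.toList) length) st)
        (List.replicate sen.toList.length (List.replicate sen.toList.length false), (0 : Int), (-1 : Int))).2.1,
       ((PySem.List.pyRange 1 ((sen.toList.length : Int)+1) 1).foldl (fun st length =>
        (PySem.List.pyRange 0 ((sen.toList.length : Int) - length + 1) 1).foldl
          (pvABody sen.toList (dct.map String.toList) length) st)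
        (List.replicate sen.toList.length (List.replicate sen.toList.length false), (0 : Int), (-1 : Int))).2.2) := rfl

theorem pvCellP_small (cs : List Char) (d : List (List Char)) (L k s e : Nat)
    (h1 : s ≤ e) (h2 : e + 1 - s ≤ L - 1) :
    pvCellP cs d L k s e = pvSeg cs d s (e+1-s) := by
  unfold pvCellP pvCell
  have hne : ¬ (e + 1 - s = L) := by omega
  simp [h1, h2, hne]

theorem pvA_step (cs : List Char) (d : List (List Char)) (L k : Nat)
    (hL1 : 1 ≤ L) (hkL : k + L ≤ cs.length) (m si : Int) :
    pvABody cs d (L : Int) (pvMatP cs d L k, m, si) (k : Int)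
      = (pvMatP cs d L (k+1),
         if pvSeg cs d k L = true then
           (if m < (L : Int) then ((L : Int), (k : Int)) else (m, si))
         else (m, si)) := by
  unfold pvABody
  simp only []
  have he1 : (k : Int) + (L : Int) - 1 + 1 = ((k + L : Nat) : Int) := by push_cast; ring
  have he2 : (k : Int) + (L : Int) - 1 = ((k + L - 1 : Nat) : Int) := by omega
  rw [he1, he2, PySem.List.slice_natCast]
  have he3 : k + L - k = L := by omega
  rw [he3]
  have hlen : ((cs.drop k).take L).length = L := length_pvChunk cs k L (by omega)
  have hwrite : pvSeg cs d k L = true →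
      PySem.List.pySetD (pvMatP cs d L k) (k : Int)
        (PySem.List.pySetD (PySem.List.pyGetD (pvMatP cs d L k) (k : Int) []) ((k + L - 1 : Nat) : Int) true)
        = pvMatP cs d L (k+1) := fun h => pvMatP_write cs d L k hL1 hkL h
  by_cases hmem : (cs.drop k).take L ∈ d
  · have hseg : pvSeg cs d k L = true := pvSeg_of_mem cs d k L hmem
    rw [if_pos hmem, hwrite hseg, hlen, hseg]
    by_cases hm : m < (L : Int) <;> simp [hm]
  · rw [if_neg hmem]
    -- the tail scan finds something iff the split disjunct of pvSeg holds
    have hpred : ∀ t, t < L - 1 →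
        (PySem.List.pyGetD (PySem.List.pyGetD (pvMatP cs d L k) (k : Int) []) ((k : Int) + (t : Int)) false &&
         PySem.List.pyGetD (PySem.List.pyGetD (pvMatP cs d L k) ((k : Int) + (t : Int) + 1) []) ((k + L - 1 : Nat) : Int) false)
        = (pvSeg cs d k (t+1) && pvSeg cs d (k+t+1) (L-1-t)) := by
      intro t ht
      have hc1 : (k : Int) + (t : Int) = ((k + t : Nat) : Int) := by push_cast; ring
      have hc2 : ((k + t : Nat) : Int) + 1 = ((k + t + 1 : Nat) : Int) := by push_cast; ring
      rw [hc1, hc2]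
      rw [pvMatP_read cs d L k k (k+t) (by omega) (by omega),
          pvMatP_read cs d L k (k+t+1) (k+L-1) (by omega) (by omega)]
      rw [pvCellP_small cs d L k k (k+t) (by omega) (by omega),
          pvCellP_small cs d L k (k+t+1) (k+L-1) (by omega) (by omega)]
      have e1 : k + t + 1 - k = t + 1 := by omega
      have e2 : k + L - 1 + 1 - (k + t + 1) = L - 1 - t := by omega
      rw [e1, e2]
    have hsplit : pvSeg cs d k L =
        ((List.range (L-1)).any (fun t => pvSeg cs d k (t+1) && pvSeg cs d (k+t+1) (L-1-t))) := by
      rw [pvSeg_eq]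
      have : pvChunk cs k L ∈ d ↔ (cs.drop k).take L ∈ d := Iff.rfl
      simp [pvChunk, hmem]
    have hrng : PySem.List.pyRange (k : Int) ((k + L - 1 : Nat) : Int) 1
        = (List.range (L-1)).map (fun (t : Nat) => (k : Int) + (t : Int)) := by
      rw [PySem.List.pyRange_one]
      have : (((k + L - 1 : Nat) : Int) - (k : Int)).toNat = L - 1 := by omega
      rw [this]
    rw [hrng, List.find?_map]
    by_cases hseg : pvSeg cs d k L = true
    · have hany : (List.range (L-1)).any
          ((fun tail =>
            PySem.List.pyGetD (PySem.List.pyGetD (pvMatP cs d L k) (k : Int) []) tail false &&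
            PySem.List.pyGetD (PySem.List.pyGetD (pvMatP cs d L k) (tail+1) []) ((k + L - 1 : Nat) : Int) false)
           ∘ (fun (t : Nat) => (k : Int) + (t : Int))) = true := by
        rw [hsplit] at hseg
        obtain ⟨t, htm, htp⟩ := List.any_eq_true.mp hseg
        refine List.any_eq_true.mpr ⟨t, htm, ?_⟩
        exact (hpred t (List.mem_range.mp htm)).trans htp
      have hsome := List.find?_isSome.mpr (List.any_eq_true.mp hany)
      obtain ⟨v, hv⟩ := Option.isSome_iff_exists.mp hsome
      rw [hv]
      rw [hwrite hseg, hlen, hseg]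
      by_cases hm : m < (L : Int) <;> simp [hm]
    · have hnone : (List.range (L-1)).find?
          ((fun tail =>
            PySem.List.pyGetD (PySem.List.pyGetD (pvMatP cs d L k) (k : Int) []) tail false &&
            PySem.List.pyGetD (PySem.List.pyGetD (pvMatP cs d L k) (tail+1) []) ((k + L - 1 : Nat) : Int) false)
           ∘ (fun (t : Nat) => (k : Int) + (t : Int))) = none := by
        rw [List.find?_eq_none]
        intro t htm hc
        apply hseg
        rw [hsplit]
        refine List.any_eq_true.mpr ⟨t, htm, ?_⟩
        exact (hpred t (List.mem_range.mp htm)).symm.trans hc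
      rw [hnone]
      have hsk := pvMatP_skip cs d L k (by revert hseg; cases pvSeg cs d k L <;> simp)
      rw [if_neg hseg]
      rw [← hsk]
      rfl

theorem pvA_inner_noupd (cs : List Char) (d : List (List Char)) (L : Nat)
    (hL1 : 1 ≤ L) (hLn : L ≤ cs.length) :
    ∀ c k, k + c = cs.length - L + 1 → ∀ m si, ¬(m < (L : Int)) →
    (PySem.List.pyRange (k : Int) ((cs.length - L + 1 : Nat) : Int) 1).foldl
      (pvABody cs d (L : Int)) (pvMatP cs d L k, m, si)
      = (pvMat cs d L, m, si) := by
  intro c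
  induction c with
  | zero =>
    intro k hk m si _
    have : k = cs.length - L + 1 := by omega
    subst this
    rw [PySem.List.pyRange_one_eq_nil (le_refl _)]
    simp [pvMatP_full cs d L hL1 hLn]
  | succ c IH =>
    intro k hk m si hm
    rw [PySem.List.pyRange_one_cons (by omega : (k : Int) < ((cs.length - L + 1 : Nat) : Int))]
    rw [List.foldl_cons]
    rw [pvA_step cs d L k hL1 (by omega) m si]
    have hstep : (if pvSeg cs d k L = true then
           (if m < (L : Int) then ((L : Int), (k : Int)) else (m, si))
         else (m, si)) = (m, si) := by
      by_cases h : pvSeg cs d k L = true <;> simp [h, hm]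
    rw [hstep]
    have hc : ((k : Int) + 1) = ((k + 1 : Nat) : Int) := by push_cast; ring
    rw [hc]
    exact IH (k+1) (by omega) m si hm

theorem pvA_inner (cs : List Char) (d : List (List Char)) (L : Nat)
    (hL1 : 1 ≤ L) (hLn : L ≤ cs.length) :
    ∀ c k, k + c = cs.length - L + 1 → ∀ m si, m < (L : Int) →
    (PySem.List.pyRange (k : Int) ((cs.length - L + 1 : Nat) : Int) 1).foldl
      (pvABody cs d (L : Int)) (pvMatP cs d L k, m, si)
      = (pvMat cs d L,
         match (List.range' k (cs.length - L + 1 - k)).find? (fun s => pvSeg cs d s L) with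
         | some s => ((L : Int), (s : Int))
         | none => (m, si)) := by
  intro c
  induction c with
  | zero =>
    intro k hk m si _
    have hke : k = cs.length - L + 1 := by omega
    subst hke
    rw [PySem.List.pyRange_one_eq_nil (le_refl _)]
    simp [pvMatP_full cs d L hL1 hLn]
  | succ c IH =>
    intro k hk m si hm
    rw [PySem.List.pyRange_one_cons (by omega : (k : Int) < ((cs.length - L + 1 : Nat) : Int))]
    rw [List.foldl_cons]
    rw [pvA_step cs d L k hL1 (by omega) m si]
    have hrng : cs.length - L + 1 - k = c + 1 := by omega
    rw [hrng, List.range'_succ]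
    by_cases hseg : pvSeg cs d k L = true
    · rw [if_pos hseg, if_pos hm]
      have hc : ((k : Int) + 1) = ((k + 1 : Nat) : Int) := by push_cast; ring
      rw [hc]
      rw [pvA_inner_noupd cs d L hL1 hLn c (k+1) (by omega) (L : Int) (k : Int) (by omega)]
      rw [List.find?_cons_of_pos (p := fun s => pvSeg cs d s L) (h := hseg)]
    · rw [if_neg hseg]
      have hc : ((k : Int) + 1) = ((k + 1 : Nat) : Int) := by push_cast; ring
      rw [hc]
      rw [IH (k+1) (by omega) m si hm]
      rw [List.find?_cons_of_neg (p := fun s => pvSeg cs d s L) (h := by simp [hseg])]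
      have : cs.length - L + 1 - (k + 1) = c := by omega
      rw [this]

def pvExL (cs : List Char) (d : List (List Char)) (L : Nat) : Bool :=
  (List.range (cs.length - L + 1)).any (fun s => pvSeg cs d s L)

def pvGmax (cs : List Char) (d : List (List Char)) (Λ : Nat) : Nat :=
  Nat.findGreatest (fun L => 0 < L ∧ pvExL cs d L = true) Λ

def pvGS (cs : List Char) (d : List (List Char)) (Λ : Nat) : Int :=
  if pvGmax cs d Λ = 0 then -1
  else match (List.range (cs.length - pvGmax cs d Λ + 1)).find? (fun s => pvSeg cs d s (pvGmax cs d Λ)) with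
       | some s => (s : Int)
       | none => -1

theorem pvRange'_eq_range (m : Nat) : List.range' 0 m = List.range m := (List.range_eq_range' (n := m)).symm

theorem pvA_outer (cs : List Char) (d : List (List Char)) :
    ∀ Λ, Λ ≤ cs.length →
    (List.range Λ).foldl (fun st (j : Nat) =>
        (PySem.List.pyRange 0 ((cs.length : Int) - (1 + (j : Int)) + 1) 1).foldl
          (pvABody cs d (1 + (j : Int))) st)
      (pvMat cs d 0, (0 : Int), (-1 : Int))
    = (pvMat cs d Λ, ((pvGmax cs d Λ : Nat) : Int), pvGS cs d Λ) := by
  intro Λ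
  induction Λ with
  | zero =>
    intro _
    simp [pvGmax, pvGS]
  | succ Λ IH =>
    intro hΛ
    rw [List.range_succ, List.foldl_append, IH (by omega)]
    simp only [List.foldl_cons, List.foldl_nil]
    set L := Λ + 1 with hLdef
    have hcast : (1 + (Λ : Int)) = ((L : Nat) : Int) := by rw [hLdef]; push_cast; ring
    rw [hcast]
    have hbound : ((cs.length : Int) - ((L : Nat) : Int) + 1) = ((cs.length - L + 1 : Nat) : Int) := by
      omega
    rw [hbound]
    have hzero : (0 : Int) = ((0 : Nat) : Int) := rfl
    have hmlt : ((pvGmax cs d Λ : Nat) : Int) < ((L : Nat) : Int) := by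
      have := Nat.findGreatest_le (P := fun L => 0 < L ∧ pvExL cs d L = true) Λ
      have h2 : pvGmax cs d Λ ≤ Λ := this
      omega
    have hmat : pvMat cs d Λ = pvMatP cs d L 0 := by
      have : Λ = L - 1 := by omega
      rw [this]
      exact pvMatP_zero cs d L
    rw [hmat, hzero]
    rw [pvA_inner cs d L (by omega) (by omega) (cs.length - L + 1) 0 (by omega) _ _ hmlt]
    rw [Nat.sub_zero, pvRange'_eq_range]
    cases hfind : (List.range (cs.length - L + 1)).find? (fun s => pvSeg cs d s L) with
    | some s =>
      have hP : 0 < L ∧ pvExL cs d L = true := by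
        refine ⟨by omega, ?_⟩
        unfold pvExL
        refine List.any_eq_true.mpr ⟨s, List.mem_of_find?_eq_some hfind, ?_⟩
        exact List.find?_some (p := fun s => pvSeg cs d s L) hfind
      have hG : pvGmax cs d L = L := by
        unfold pvGmax
        rw [hLdef] at hP ⊢
        rw [Nat.findGreatest_succ, if_pos hP]
      rw [hG]
      unfold pvGS
      rw [hG, hfind]
      simp [hLdef]
    | none =>
      have hnP : ¬ (0 < L ∧ pvExL cs d L = true) := by
        intro ⟨_, hex⟩
        unfold pvExL at hex
        obtain ⟨s, hsm, hsp⟩ := List.any_eq_true.mp hex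
        have := List.find?_eq_none.mp hfind s hsm
        exact this hsp
      have hG : pvGmax cs d L = pvGmax cs d Λ := by
        unfold pvGmax
        rw [hLdef] at hnP ⊢
        rw [Nat.findGreatest_succ, if_neg hnP]
      unfold pvGS
      rw [hG]

theorem a_eq_G (sen : String) (dct : List String) :
    word_break_longest sen dct
      = (((pvGmax sen.toList (dct.map String.toList) sen.toList.length : Nat) : Int),
         pvGS sen.toList (dct.map String.toList) sen.toList.length) := by
  rw [word_break_longest_eq_body]
  set cs := sen.toList with hcs
  set d := dct.map String.toList with hd
  set n := cs.length with hn
  have hrng : PySem.List.pyRange 1 ((n : Int) + 1) 1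
      = (List.range n).map (fun (k : Nat) => 1 + (k : Int)) := by
    rw [PySem.List.pyRange_one]
    have : (((n : Int) + 1) - 1).toNat = n := by omega
    rw [this]
  rw [hrng, List.foldl_map, pvMat_init cs d]
  rw [pvA_outer cs d n (le_refl n)]

-- bridge: the two characterisations agree
theorem pvFm_eq_pvGmax (cs : List Char) (d : List (List Char)) :
    pvFm (pvMaxSeg cs d) cs.length = pvGmax cs d cs.length := by
  set n := cs.length with hn
  apply le_antisymm
  · rcases pvFm_attain (pvMaxSeg cs d) n with h | ⟨j, hj, hfj⟩
    · rw [h]; exact Nat.zero_le _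
    · rw [← hfj]
      by_cases h0 : pvMaxSeg cs d j = 0
      · rw [h0]; exact Nat.zero_le _
      · set L := pvMaxSeg cs d j with hL
        have hseg : pvSeg cs d j L = true := pvSeg_pvMaxSeg cs d j (by omega)
        have hLle : L ≤ n - j := pvMaxSeg_le cs d j
        apply Nat.le_findGreatest (by omega)
        refine ⟨by omega, ?_⟩
        unfold pvExL
        exact List.any_eq_true.mpr ⟨j, List.mem_range.mpr (by omega), hseg⟩
  · by_cases h0 : pvGmax cs d n = 0
    · rw [h0]; exact Nat.zero_le _
    · set G := pvGmax cs d n with hG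
      have hP : 0 < G ∧ pvExL cs d G = true :=
        (Nat.findGreatest_eq_iff.1 rfl).2.1 h0
      have hGn : G ≤ n := Nat.findGreatest_le n
      obtain ⟨s, hsm, hsp⟩ := List.any_eq_true.mp hP.2
      rw [List.mem_range] at hsm
      have hmax : G ≤ pvMaxSeg cs d s := le_pvMaxSeg cs d s G hP.1 (by omega) hsp
      have : pvMaxSeg cs d s ≤ pvFm (pvMaxSeg cs d) n := le_pvFm _ n s (by omega)
      omega

theorem pvFind?_congr {α : Type} (l : List α) (p q : α → Bool)
    (h : ∀ x ∈ l, p x = q x) : l.find? p = l.find? q := by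
  induction l with
  | nil => rfl
  | cons a t IH =>
    have ha := h a (List.mem_cons_self)
    cases hpa : p a with
    | true =>
      rw [List.find?_cons_of_pos (h := hpa), List.find?_cons_of_pos (h := by rw [← ha]; exact hpa)]
    | false =>
      rw [List.find?_cons_of_neg (h := by simp [hpa]), List.find?_cons_of_neg (h := by rw [← ha]; simp [hpa])]
      exact IH (fun x hx => h x (List.mem_cons_of_mem a hx))

theorem pvGS_eq (cs : List Char) (d : List (List Char)) :
    pvGS cs d cs.length
      = (if pvFm (pvMaxSeg cs d) cs.length = 0 then (-1 : Int)
         else (((List.range cs.length).find?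
            (fun j => pvMaxSeg cs d j == pvFm (pvMaxSeg cs d) cs.length)).getD 0 : Int)) := by
  set n := cs.length with hn
  rw [pvFm_eq_pvGmax cs d]
  unfold pvGS
  by_cases h0 : pvGmax cs d n = 0
  · rw [if_pos h0, if_pos h0]
  · rw [if_neg h0, if_neg h0]
    set G := pvGmax cs d n with hG
    have hP : 0 < G ∧ pvExL cs d G = true :=
      (Nat.findGreatest_eq_iff.1 rfl).2.1 h0
    have hGn : G ≤ n := Nat.findGreatest_le n
    -- the two predicates agree on range (n-G+1), and the second is false beyond
    have hiff : ∀ j, j ≤ n - G → ((pvMaxSeg cs d j == G) = pvSeg cs d j G) := by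
      intro j hj
      by_cases hseg : pvSeg cs d j G = true
      · have h1 : G ≤ pvMaxSeg cs d j := le_pvMaxSeg cs d j G hP.1 (by omega) hseg
        have h2 : pvMaxSeg cs d j ≤ G := by
          have := le_pvFm (pvMaxSeg cs d) n j (by omega)
          rw [pvFm_eq_pvGmax cs d] at this
          exact this
        have : pvMaxSeg cs d j = G := by omega
        simp [this, hseg]
      · have : ¬ (pvMaxSeg cs d j = G) := by
          intro hc
          exact hseg (by rw [← hc]; exact pvSeg_pvMaxSeg cs d j (by omega))
        simp [this, hseg]
    have hsplit : List.range n = List.range (n - G + 1) ++ (List.range (G - 1)).map (fun x => (n - G + 1) + x) := by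
      conv_lhs => rw [show n = (n - G + 1) + (G - 1) by omega]
      rw [List.range_add]
    have hfalse : ∀ j ∈ (List.range (G - 1)).map (fun x => (n - G + 1) + x),
        (pvMaxSeg cs d j == G) = false := by
      intro j hj
      obtain ⟨x, hx, rfl⟩ := List.mem_map.mp hj
      have hle : pvMaxSeg cs d (n - G + 1 + x) ≤ n - (n - G + 1 + x) := pvMaxSeg_le cs d _
      have : ¬ (pvMaxSeg cs d (n - G + 1 + x) = G) := by omega
      simp [this]
    have hfind2 : (List.range n).find? (fun j => pvMaxSeg cs d j == G)
        = (List.range (n - G + 1)).find? (fun j => pvSeg cs d j G) := by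
      rw [hsplit, List.find?_append]
      have h2none : ((List.range (G - 1)).map (fun x => (n - G + 1) + x)).find?
          (fun j => pvMaxSeg cs d j == G) = none := by
        rw [List.find?_eq_none]
        intro j hj
        rw [hfalse j hj]
        simp
      rw [h2none]
      rw [pvFind?_congr (List.range (n - G + 1)) _ _
        (fun j hj => hiff j (by have := List.mem_range.mp hj; omega))]
      simp
    rw [hfind2]
    obtain ⟨s, hsm, hsp⟩ := List.any_eq_true.mp hP.2
    have hsome : (List.range (n - G + 1)).find? (fun j => pvSeg cs d j G) ≠ none := by
      intro hc
      exact (List.find?_eq_none.mp hc s hsm) hsp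
    cases hfind : (List.range (n - G + 1)).find? (fun j => pvSeg cs d j G) with
    | some v => simp
    | none => exact absurd hfind hsome

theorem a_eq_pvOut (sen : String) (dct : List String) :
    word_break_longest sen dct = pvOut sen.toList (dct.map String.toList) := by
  rw [a_eq_G]
  unfold pvOut
  rw [pvFm_eq_pvGmax, pvGS_eq, pvFm_eq_pvGmax]

theorem pv_a_eq_alt (sen : String) (dct : List String) :
    word_break_longest sen dct = word_break_longest_alt sen dct := by
  rw [a_eq_pvOut, alt_eq_pvOut]

-- ===== VERDICT (by name: the statement is the Claim_ definition above) =====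
theorem word_break_longest_spec : Claim_equal_word_break_longest := by
  intro sen dct _
  unfold Spec_word_break_longest
  exact pv_a_eq_alt sen dct
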